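-- pv_equiv track=rewrite | github.com/WhiteRobe/ShuaTi | leetcode/dynamicProgramming/接雨水42.py | scan_level
-- ===== SOURCE A (Python) =====
-- def scan_level(height, reverse=False):
--     height = height[::-1] if reverse else height
--     level = [0] * len(height)
--     current_height = height[0]
--     for i, h in enumerate(height):
--         level[i] = max(current_height - h, 0)  # 计算所能盛的水量
--         current_height = max(h, current_height)  # 修正单侧高度
--     return level[::-1] if reverse else level
-- ===== SOURCE B (Python) =====
-- def scan_level(height, reverse=False):
--     seq = height[::-1] if reverse else height
--     level = [max(seq[:i + 1]) - seq[i] for i in range(len(seq))]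
--     return level[::-1] if reverse else level
-- ===== Notes on version B (the rewrite author's own statement) =====
-- stated objective: alternative
-- what changed: B drops A's running-max accumulator and in-place level array entirely: each entry is computed independently as max(seq[:i+1]) - seq[i], a brute-force prefix scan per index (O(n^2)) instead of A's stateful O(n) loop; no clamp is needed since the inclusive prefix max dominates seq[i].
import Mathlib
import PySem

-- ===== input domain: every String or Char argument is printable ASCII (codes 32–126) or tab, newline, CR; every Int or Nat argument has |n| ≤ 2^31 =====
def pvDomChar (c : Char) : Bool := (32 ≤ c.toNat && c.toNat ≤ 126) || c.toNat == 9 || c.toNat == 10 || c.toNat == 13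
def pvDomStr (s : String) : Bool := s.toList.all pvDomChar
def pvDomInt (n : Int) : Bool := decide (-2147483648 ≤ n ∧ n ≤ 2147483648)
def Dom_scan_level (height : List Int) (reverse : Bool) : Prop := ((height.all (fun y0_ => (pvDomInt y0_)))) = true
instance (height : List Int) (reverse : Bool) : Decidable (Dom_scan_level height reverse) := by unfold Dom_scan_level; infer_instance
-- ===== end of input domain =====

-- B computes each entry independently as max(seq[:i+1]) - seq[i] (stateless brute force)
-- instead of A's stateful running-max loop; return-value equivalence on nonempty input only.

-- ===== PORT A =====
-- A: level preallocated as zeros, updated in place while tracking the running max.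
def scan_level (height : List Int) (reverse : Bool) : List Int :=
  let h2 : List Int := if reverse then height.reverse else height   -- height[::-1]
  let level0 : List Int := List.replicate h2.length 0
  let cur0 : Int := (PySem.List.pyGet? h2 0).getD 0   -- first element of the sequence; none (IndexError) excluded by Pre_
  let st := (PySem.List.enumerate h2 0).foldl
    (fun (st : List Int × Int) (p : Int × Int) =>
      (st.1.set p.1.toNat (max (st.2 - p.2) 0), max p.2 st.2)) (level0, cur0)
  if reverse then st.1.reverse else st.1

-- ===== PORT B =====
def scan_level_alt (height : List Int) (reverse : Bool) : List Int :=
  let seq : List Int := if reverse then height.reverse else height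
  let level : List Int := (PySem.List.pyRange 0 (seq.length : Int) 1).map
    (fun i => (PySem.List.max? (PySem.List.slice seq none (some (i + 1))) (fun x => x)).getD 0
              - PySem.List.pyGetD seq i 0)
  if reverse then level.reverse else level

-- ===== PRECONDITION & SPEC =====
-- Pre_ excludes only the empty list, on which A raises IndexError reading the first element.
def Pre_scan_level (height : List Int) (reverse : Bool) : Prop := height ≠ []
instance (height : List Int) (reverse : Bool) : Decidable (Pre_scan_level height reverse) := by unfold Pre_scan_level; infer_instance
def pvWitness_scan_level : List Int × Bool := ([3, 0, 2], false)
def Spec_scan_level (height : List Int) (reverse : Bool) (out : List Int) : Prop := out = scan_level_alt height reverse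
instance (height : List Int) (reverse : Bool) (out : List Int) : Decidable (Spec_scan_level height reverse out) := by unfold Spec_scan_level; infer_instance

-- ===== CLAIM (what is proved, stated in full; the proofs are below) =====
def Claim_equal_scan_level : Prop := ∀ (height : List Int) (reverse : Bool), Dom_scan_level height reverse → Pre_scan_level height reverse → Spec_scan_level height reverse (scan_level height reverse)

-- ===== LEMMAS AND PROOFS =====

-- the per-element values A computes, as a structural recursion
def coreA : Int → List Int → List Int
  | _, [] => []
  | c, h :: t => max (c - h) 0 :: coreA (max h c) t

-- A's enumerate-fold, generalized over an already-written prefix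
theorem foldA (l : List Int) : ∀ (pre : List Int) (c : Int),
    ((PySem.List.enumerate l (pre.length : Int)).foldl
      (fun (st : List Int × Int) (p : Int × Int) =>
        (st.1.set p.1.toNat (max (st.2 - p.2) 0), max p.2 st.2))
      (pre ++ List.replicate l.length 0, c)).1
    = pre ++ coreA c l := by
  induction l with
  | nil => intro pre c; simp [PySem.List.enumerate_nil, coreA]
  | cons h t ih =>
    intro pre c
    rw [PySem.List.enumerate_cons]
    simp only [List.foldl_cons]
    have hset : (pre ++ List.replicate (h :: t).length 0).set
        ((pre.length : Int)).toNat (max (c - h) 0)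
        = (pre ++ [max (c - h) 0]) ++ List.replicate t.length 0 := by
      simp [List.replicate_succ]
    rw [hset]
    have hlen : ((pre ++ [max (c - h) 0]).length : Int) = (pre.length : Int) + 1 := by
      simp
    have := ih (pre ++ [max (c - h) 0]) (max h c)
    rw [hlen] at this
    rw [this]
    simp [coreA]

-- A's values pointwise: entry i equals (prefix max through i under seed c) minus l[i]
theorem coreA_char (l : List Int) : ∀ (c : Int),
    coreA c l = (List.range l.length).map
      (fun i => ((l.take (i + 1)).foldl max c) - l.getD i 0) := by
  induction l with
  | nil => intro c; simp [coreA]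
  | cons h t ih =>
    intro c
    simp only [coreA, List.length_cons, List.range_succ_eq_map, List.map_cons, List.map_map]
    rw [List.cons_eq_cons]
    constructor
    · simp; omega
    · rw [ih (max h c)]
      apply List.map_congr_left
      intro i _
      simp [Function.comp, List.take_succ_cons, max_comm h c]

-- ===== VERDICT (by name: the statement is the Claim_ definition above) =====
theorem scan_level_spec : Claim_equal_scan_level := by
  intro height reverse _ hpre
  unfold Spec_scan_level scan_level scan_level_alt
  have main : ∀ (seq : List Int), seq ≠ [] →
      ((PySem.List.enumerate seq 0).foldl
        (fun (st : List Int × Int) (p : Int × Int) =>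
          (st.1.set p.1.toNat (max (st.2 - p.2) 0), max p.2 st.2))
        (List.replicate seq.length 0, (PySem.List.pyGet? seq 0).getD 0)).1
      = (PySem.List.pyRange 0 (seq.length : Int) 1).map
          (fun i => (PySem.List.max? (PySem.List.slice seq none (some (i + 1))) (fun x => x)).getD 0
              - PySem.List.pyGetD seq i 0) := by
    intro seq hne
    obtain ⟨h, t, rfl⟩ := List.exists_cons_of_ne_nil hne
    have hA := foldA (h :: t) [] ((PySem.List.pyGet? (h :: t) 0).getD 0)
    simp only [List.length_nil, Int.natCast_zero, List.nil_append] at hA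
    rw [hA]
    rw [PySem.List.pyGet?_zero_cons, Option.getD_some]
    rw [coreA_char]
    rw [show ((h :: t).length : Int) = (0 : Int) + ((h :: t).length : Int) by omega,
        PySem.List.pyRange_one]
    simp only [add_sub_cancel_left, Int.toNat_natCast, List.map_map]
    apply List.map_congr_left
    intro i hi
    simp only [List.mem_range] at hi
    simp only [Function.comp, zero_add]
    have hslice : PySem.List.slice (h :: t) none (some ((i : Int) + 1))
        = (h :: t).take (i + 1) := by
      rw [show ((i : Int) + 1) = (((i + 1 : Nat)) : Int) by push_cast; ring,
          PySem.List.slice_to_natCast]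
    rw [hslice, List.take_succ_cons, PySem.List.max?_id_cons, Option.getD_some,
        PySem.List.pyGetD_natCast]
    simp [List.foldl_cons]
  cases reverse with
  | false =>
    simp only [if_false, Bool.false_eq_true]
    exact main height hpre
  | true =>
    simp only [if_true]
    rw [main height.reverse (by simpa using hpre)]
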